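-- pv_equiv track=rewrite | github.com/justin-thakral/dullyPDF | backend/firebaseDB/db_proxy.py | _pick_identifier_key
-- ===== SOURCE A (Python) =====
-- from typing import List, Optional
--
-- def _pick_identifier_key(columns: List[str]) -> Optional[str]:
--     lower = {c.lower(): c for c in columns}
--     for pref in ["mrn", "patient_id", "enterprise_patient_id", "external_mrn", "id"]:
--         if pref in lower:
--             return lower[pref]
--     for col in columns:
--         if "mrn" in col.lower():
--             return col
--     for col in columns:
--         if col.lower().endswith("_id") or col.lower() == "id":
--             return col
--     return columns[0] if columns else None
-- ===== SOURCE B (Python) =====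
-- from typing import List, Optional
--
-- _PREFERRED = ["mrn", "patient_id", "enterprise_patient_id", "external_mrn", "id"]
--
--
-- def _pick_identifier_key(columns: List[str]) -> Optional[str]:
--     lower = {c.lower(): c for c in columns}
--     for pref in _PREFERRED:
--         if pref in lower:
--             return lower[pref]
--     # No exact preferred name: score every column once and keep the earliest
--     # column with the best (smallest) rank.
--     best: Optional[str] = None
--     best_rank = 3
--     for col in columns:
--         low = col.lower()
--         if "mrn" in low:
--             rank = 0
--         elif low.endswith("_id") or low == "id":
--             rank = 1
--         else:
--             rank = 2
--         if rank < best_rank: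
--             best, best_rank = col, rank
--     return best
-- ===== Notes on version B (the rewrite author's own statement) =====
-- stated objective: alternative
-- what changed: Keeps the lowercase->original preference lookup but replaces A's three sequential fallback scans (mrn-substring, then *_id/id, then first column) with a single scoring pass that keeps the earliest column of minimal rank.
import Mathlib
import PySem

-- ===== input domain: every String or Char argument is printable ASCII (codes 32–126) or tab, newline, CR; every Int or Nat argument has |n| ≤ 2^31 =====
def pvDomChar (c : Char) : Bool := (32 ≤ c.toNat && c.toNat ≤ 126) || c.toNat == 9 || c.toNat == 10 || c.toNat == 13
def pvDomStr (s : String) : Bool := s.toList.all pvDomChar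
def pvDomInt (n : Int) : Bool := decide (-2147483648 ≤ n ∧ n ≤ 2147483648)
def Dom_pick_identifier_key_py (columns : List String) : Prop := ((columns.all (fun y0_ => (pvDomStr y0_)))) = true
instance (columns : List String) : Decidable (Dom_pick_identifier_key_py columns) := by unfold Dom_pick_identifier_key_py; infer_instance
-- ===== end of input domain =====

-- B keeps the lowercase->original preference lookup but replaces A's three sequential
-- fallback scans with one min-rank scoring pass (alternative decomposition, same cost).

-- ===== PORT A =====
def pvPrefs : List String := ["mrn", "patient_id", "enterprise_patient_id", "external_mrn", "id"]

-- A's 'for pref in [...]: if pref in lower: return lower[pref]'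
def pvPrefLoopA (lower : PySem.Dict String String) : List String → Option String
  | [] => none
  | p :: ps =>
    match lower.get? p with
    | some v => some v
    | none => pvPrefLoopA lower ps

def pick_identifier_key_py (columns : List String) : Option String :=
  let lower := columns.foldl (fun d c => d.insert (PySem.Str.lower c) c) PySem.Dict.empty
  match pvPrefLoopA lower pvPrefs with
  | some v => some v
  | none =>
    match columns.find? (fun col => PySem.Str.isIn "mrn" (PySem.Str.lower col)) with
    | some col => some col
    | none =>
      match columns.find? (fun col =>
          PySem.Str.endswith (PySem.Str.lower col) "_id" || PySem.Str.lower col == "id") with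
      | some col => some col
      | none =>
        match columns with
        | [] => none
        | c :: _ => some c

-- ===== PORT B =====
-- Source B's 'for pref in _PREFERRED: if pref in lower: return lower[pref]'
def pvPrefLoopB (lower : PySem.Dict String String) : List String → Option String
  | [] => none
  | p :: ps =>
    match lower.get? p with
    | some v => some v
    | none => pvPrefLoopB lower ps

-- Source B's rank of one column
def pvRank (col : String) : Nat :=
  let low := PySem.Str.lower col
  if PySem.Str.isIn "mrn" low then 0
  else if PySem.Str.endswith low "_id" || low == "id" then 1
  else 2

def pick_identifier_key_py_alt (columns : List String) : Option String :=
  let lower := columns.foldl (fun d c => d.insert (PySem.Str.lower c) c) PySem.Dict.empty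
  match pvPrefLoopB lower pvPrefs with
  | some v => some v
  | none =>
    (columns.foldl
      (fun acc col => if pvRank col < acc.2 then (some col, pvRank col) else acc)
      ((none : Option String), 3)).1

-- ===== PRECONDITION & SPEC =====
def Spec_pick_identifier_key_py (columns : List String) (out : Option String) : Prop := out = pick_identifier_key_py_alt columns
instance (columns : List String) (out : Option String) : Decidable (Spec_pick_identifier_key_py columns out) := by unfold Spec_pick_identifier_key_py; infer_instance

-- ===== CLAIM (what is proved, stated in full; the proofs are below) =====
def Claim_equal_pick_identifier_key_py : Prop := ∀ (columns : List String), Dom_pick_identifier_key_py columns → Spec_pick_identifier_key_py columns (pick_identifier_key_py columns)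

-- ===== LEMMAS AND PROOFS =====

-- both preference loops are the same scan over the same dict
theorem pvPrefLoop_eq (lower : PySem.Dict String String) (ps : List String) :
    pvPrefLoopA lower ps = pvPrefLoopB lower ps := by
  induction ps with
  | nil => rfl
  | cons p ps ih =>
    simp only [pvPrefLoopA, pvPrefLoopB]
    cases lower.get? p with
    | some v => rfl
    | none => exact ih

-- fallback fold, accumulator rank 0: nothing changes any more
theorem pvFold0 (xs : List String) (b : Option String) :
    (xs.foldl (fun acc col => if pvRank col < acc.2 then (some col, pvRank col) else acc)
      (b, 0)).1 = b := by
  induction xs with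
  | nil => rfl
  | cons x xs ih => simpa using ih

-- accumulator rank 1: only an mrn-column can still win
theorem pvFold1 (xs : List String) (b : Option String) :
    (xs.foldl (fun acc col => if pvRank col < acc.2 then (some col, pvRank col) else acc)
      (b, 1)).1 =
      match xs.find? (fun col => PySem.Str.isIn "mrn" (PySem.Str.lower col)) with
      | some c => some c
      | none => b := by
  induction xs generalizing b with
  | nil => rfl
  | cons x xs ih =>
    by_cases h0 : PySem.Chars.isIn ['m','r','n'] (PySem.Chars.lower x.toList) = true
    · have hr : pvRank x = 0 := by simp [pvRank, h0]
      simp [hr, pvFold0, h0]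
    · have hr : ¬ pvRank x < 1 := by
        simp [pvRank, h0]
        split <;> simp
      simp [hr, ih, h0]

-- accumulator rank 2: mrn beats _id/id, which beats the stored value
theorem pvFold2 (xs : List String) (b : Option String) :
    (xs.foldl (fun acc col => if pvRank col < acc.2 then (some col, pvRank col) else acc)
      (b, 2)).1 =
      match xs.find? (fun col => PySem.Str.isIn "mrn" (PySem.Str.lower col)) with
      | some c => some c
      | none =>
        match xs.find? (fun col =>
            PySem.Str.endswith (PySem.Str.lower col) "_id" || PySem.Str.lower col == "id") with
        | some c => some c
        | none => b := by
  induction xs generalizing b with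
  | nil => rfl
  | cons x xs ih =>
    by_cases h0 : PySem.Chars.isIn ['m','r','n'] (PySem.Chars.lower x.toList) = true
    · have hr : pvRank x = 0 := by simp [pvRank, h0]
      simp [hr, pvFold0, h0]
    · by_cases h1e : PySem.Chars.endswith (PySem.Chars.lower x.toList) ['_','i','d'] = true
      · have hr : pvRank x = 1 := by simp [pvRank, h0, h1e]
        simp [hr, pvFold1, h0, h1e]
      · by_cases h1s : PySem.Str.lower x = "id"
        · have hr : pvRank x = 1 := by
            simp [pvRank, h1s]
            decide
          simp [hr, pvFold1, h0, h1e, h1s]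
        · have hr : pvRank x = 2 := by simp [pvRank, h0, h1e, h1s]
          simp [hr, ih, h0, h1e, h1s]

-- accumulator rank 3 (the initial state): every column beats it
theorem pvFold3 (xs : List String) :
    (xs.foldl (fun acc col => if pvRank col < acc.2 then (some col, pvRank col) else acc)
      ((none : Option String), 3)).1 =
      match xs.find? (fun col => PySem.Str.isIn "mrn" (PySem.Str.lower col)) with
      | some c => some c
      | none =>
        match xs.find? (fun col =>
            PySem.Str.endswith (PySem.Str.lower col) "_id" || PySem.Str.lower col == "id") with
        | some c => some c
        | none =>
          match xs with
          | [] => none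
          | c :: _ => some c := by
  cases xs with
  | nil => rfl
  | cons x xs =>
    by_cases h0 : PySem.Chars.isIn ['m','r','n'] (PySem.Chars.lower x.toList) = true
    · have hr : pvRank x = 0 := by simp [pvRank, h0]
      simp [hr, pvFold0, h0]
    · by_cases h1e : PySem.Chars.endswith (PySem.Chars.lower x.toList) ['_','i','d'] = true
      · have hr : pvRank x = 1 := by simp [pvRank, h0, h1e]
        simp [hr, pvFold1, h0, h1e]
      · by_cases h1s : PySem.Str.lower x = "id"
        · have hr : pvRank x = 1 := by
            simp [pvRank, h1s]
            decide
          simp [hr, pvFold1, h0, h1e, h1s]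
        · have hr : pvRank x = 2 := by simp [pvRank, h0, h1e, h1s]
          simp [hr, pvFold2, h0, h1e, h1s]

-- ===== VERDICT (by name: the statement is the Claim_ definition above) =====
theorem pick_identifier_key_py_spec : Claim_equal_pick_identifier_key_py := by
  intro columns _
  unfold Spec_pick_identifier_key_py pick_identifier_key_py pick_identifier_key_py_alt
  dsimp only
  rw [pvPrefLoop_eq]
  cases pvPrefLoopB (columns.foldl (fun d c => d.insert (PySem.Str.lower c) c) PySem.Dict.empty) pvPrefs with
  | some v => rfl
  | none => simp only [pvFold3]
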